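-- pv_equiv track=rewrite | github.com/kiteday/Algorithm | week19/삼각 달팽이_minji-o-j.py | solution
-- ===== SOURCE A (Python) =====
-- def solution(n):
--     rulelist=[[1,0],[0,1],[-1,-1]] # 아래로, 오른쪽으로, 왼쪽위로
--     square= [[[] for _ in range (n)] for _ in range(n)] # 빈배열 만들기
--
--     # n번 꺾는다, 그리고 n->n-1..이런식으로 줄어들음
--     startnum=1
--     rule=0
--     row,col=-1,0
--
--     for i in range(n,0,-1):
--         for j in range(i):
--             row+=rulelist[rule%3][0]
--             col+=rulelist[rule%3][1]
--             square[row][col]=startnum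
--             startnum+=1
--         rule+=1
--
--     answer = []
--     for i in range(len(square)):
--         for j in range(len(square)):
--             if square[i][j]:
--                 answer.append(square[i][j])
--
--
--     return answer
-- ===== SOURCE B (Python) =====
-- def solution(n):
--     # Closed form: the value at triangle cell (r, c) is computed directly from its
--     # ring depth d = min(c, r-c, n-1-r); no spiral simulation, no n x n grid.
--     def value(r, c):
--         d = min(c, r - c, n - 1 - r)
--         m = n - 3 * d
--         base = n * (n + 1) // 2 - m * (m + 1) // 2 + 1
--         if c == d:
--             return base + (r - 2 * d)
--         if r == n - 1 - d:
--             return base + (m - 1) + (c - d)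
--         return base + 2 * m - 2 + (n - 1 - d - r)
--     return [value(r, c) for r in range(n) for c in range(r + 1)]
-- ===== Notes on version B (the rewrite author's own statement) =====
-- stated objective: alternative
-- what changed: Replaces the spiral walk over a preallocated n-by-n square (three direction vectors, bent legs, then a full-grid scan skipping empty cells) by a closed-form formula: for each triangle cell (r,c) in row-major order the value is computed directly from its ring depth d = min(c, r-c, n-1-r) and triangle-number arithmetic, so no simulation and no grid exist at all.
import Mathlib
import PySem

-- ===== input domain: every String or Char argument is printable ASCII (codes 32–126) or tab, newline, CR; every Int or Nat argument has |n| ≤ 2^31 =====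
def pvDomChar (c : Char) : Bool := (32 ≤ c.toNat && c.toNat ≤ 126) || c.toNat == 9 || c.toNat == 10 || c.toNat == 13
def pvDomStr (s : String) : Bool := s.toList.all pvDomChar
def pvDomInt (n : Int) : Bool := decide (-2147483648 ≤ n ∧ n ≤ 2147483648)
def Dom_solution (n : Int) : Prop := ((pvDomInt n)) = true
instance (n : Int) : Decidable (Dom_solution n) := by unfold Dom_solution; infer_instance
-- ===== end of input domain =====

-- B replaces A's spiral simulation over a preallocated n×n square by a closed-form
-- formula: each triangle cell's value is computed directly from its ring depth
-- d = min(c, r-c, n-1-r), emitted in row-major order (objective: alternative).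

-- ===== PORT A =====
-- A square cell holds Python [] (never written) or a positive int; ported as Option Int
-- (none = []).  The truth test 'if square[i][j]' is (cell.getD 0 ≠ 0): [] is falsy like 0,
-- an int v is truthy iff v ≠ 0.  Writes/reads use pySetD/pyGetD, exact on the in-range
-- indices the walk and the scan actually use.
def pvRulelist : List (List Int) := [[1, 0], [0, 1], [-1, -1]]

-- body of A's inner 'for j in range(i)' loop; state = (square, startnum, rule, row, col)
def pvStepA (s : List (List (Option Int)) × Int × Int × Int × Int) (_j : Int) :
    List (List (Option Int)) × Int × Int × Int × Int :=
  match s with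
  | (sq, startnum, rule, row, col) =>
    let row' := row + PySem.List.pyGetD (PySem.List.pyGetD pvRulelist (PySem.Int.mod rule 3) []) 0 0
    let col' := col + PySem.List.pyGetD (PySem.List.pyGetD pvRulelist (PySem.Int.mod rule 3) []) 1 0
    -- square[row][col] = startnum
    let sq' := PySem.List.pySetD sq row' (PySem.List.pySetD (PySem.List.pyGetD sq row' []) col' (some startnum))
    (sq', startnum + 1, rule, row', col')

-- one iteration of A's outer 'for i in range(n, 0, -1)' loop (inner loop, then rule += 1)
def pvLegA (s : List (List (Option Int)) × Int × Int × Int × Int) (i : Int) :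
    List (List (Option Int)) × Int × Int × Int × Int :=
  match (PySem.List.pyRange 0 i).foldl pvStepA s with
  | (sq, startnum, rule, row, col) => (sq, startnum, rule + 1, row, col)

def solution (n : Int) : List Int :=
  let square : List (List (Option Int)) :=
    (PySem.List.pyRange 0 n).map (fun _ => (PySem.List.pyRange 0 n).map (fun _ => (none : Option Int)))
  let st := (PySem.List.pyRange n 0 (-1)).foldl pvLegA (square, 1, 0, -1, 0)
  let sq := st.1
  -- answer.append(v): accumulated by consing and one final reverse (same cells,
  -- same order as the Python append loop)
  ((PySem.List.pyRange 0 (sq.length : Int)).foldl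
    (fun answer i =>
      (PySem.List.pyRange 0 (sq.length : Int)).foldl
        (fun answer j =>
          if (PySem.List.pyGetD (PySem.List.pyGetD sq i []) j none).getD 0 ≠ 0 then
            (PySem.List.pyGetD (PySem.List.pyGetD sq i []) j none).getD 0 :: answer
          else answer)
        answer)
    []).reverse

-- ===== PORT B =====
-- closed form: for triangle cell (r, c), d = min(c, r-c, n-1-r) is its ring,
-- m = n - 3d the ring's side, base the first value written on the ring
def pvValue (n r c : Int) : Int :=
  let d := min c (min (r - c) (n - 1 - r))
  let m := n - 3 * d
  let base := PySem.Int.floordiv (n * (n + 1)) 2 - PySem.Int.floordiv (m * (m + 1)) 2 + 1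
  if c = d then base + (r - 2 * d)
  else if r = n - 1 - d then base + (m - 1) + (c - d)
  else base + 2 * m - 2 + (n - 1 - d - r)

-- the comprehension [value(r, c) for r in range(n) for c in range(r + 1)]
def solution_alt (n : Int) : List Int :=
  (PySem.List.pyRange 0 n).flatMap
    (fun r => (PySem.List.pyRange 0 (r + 1)).map (fun c => pvValue n r c))

-- ===== PRECONDITION & SPEC =====
def Spec_solution (n : Int) (out : List Int) : Prop := out = solution_alt n
instance (n : Int) (out : List Int) : Decidable (Spec_solution n out) := by unfold Spec_solution; infer_instance

-- ===== CLAIM (what is proved, stated in full; the proofs are below) =====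
def Claim_equal_solution : Prop := ∀ (n : Int), Dom_solution n → Spec_solution n (solution n)

-- ===== LEMMAS AND PROOFS =====

-- triangle number x(x+1)//2, as the ports compute it
def pvQ (x : Int) : Int := PySem.Int.floordiv (x * (x + 1)) 2

-- ring depth, leg code (which of the 3n legs writes the cell) and 1-based step index within that leg
def pvD (n r c : Int) : Int := min c (min (r - c) (n - 1 - r))
def pvCode (n r c : Int) : Int :=
  if c = pvD n r c then 3 * pvD n r c
  else if r = n - 1 - pvD n r c then 3 * pvD n r c + 1
  else 3 * pvD n r c + 2
def pvSI (n r c : Int) : Int :=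
  if c = pvD n r c then r - 2 * pvD n r c + 1
  else if r = n - 1 - pvD n r c then c - pvD n r c
  else n - 1 - pvD n r c - r

-- cell (r,c) has been written after t steps of leg k
def pvW (n k t r c : Int) : Bool :=
  decide ((0 ≤ c ∧ c ≤ r ∧ r < n) ∧
    (pvCode n r c < k ∨ (pvCode n r c = k ∧ pvSI n r c ≤ t)))

-- grid invariant of A's square during the walk
def pvInv (n k t : Int) (sq : List (List (Option Int))) : Prop :=
  sq.length = n.toNat ∧ (∀ rl ∈ sq, rl.length = n.toNat) ∧
  ∀ r c : Int, 0 ≤ r → r < n → 0 ≤ c → c < n →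
    (sq.getD r.toNat []).getD c.toNat none =
      if pvW n k t r c then some (pvValue n r c) else none

-- closed form of the cursor before leg k (k legs already walked)
def pvPos (n : Int) (k : Nat) (row col : Int) : Prop :=
  (k % 3 = 0 → row = 2 * ((k / 3 : Nat) : Int) - 1 ∧ col = ((k / 3 : Nat) : Int)) ∧
  (k % 3 = 1 → row = n - 1 - ((k / 3 : Nat) : Int) ∧ col = ((k / 3 : Nat) : Int)) ∧
  (k % 3 = 2 → row = n - 1 - ((k / 3 : Nat) : Int) ∧ col = n - 1 - 2 * ((k / 3 : Nat) : Int))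

lemma pvQ_two_mul (x : Int) : 2 * pvQ x = x * (x + 1) := by
  unfold pvQ
  rw [PySem.Int.floordiv_eq_ediv_of_pos (by norm_num)]
  have h : (2 : Int) ∣ x * (x + 1) := (Int.even_mul_succ_self x).two_dvd
  omega

lemma pvQ_succ (x : Int) : pvQ x = pvQ (x - 1) + x := by
  have h1 := pvQ_two_mul x
  have h2 := pvQ_two_mul (x - 1)
  have h3 : x * (x + 1) = (x - 1) * (x - 1 + 1) + 2 * x := by ring
  linarith

lemma pvQ_mono (x y : Int) (h0 : 0 ≤ y) (h : y ≤ x) : pvQ y ≤ pvQ x := by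
  have h1 := pvQ_two_mul x
  have h2 := pvQ_two_mul y
  have h3 : y * (y + 1) ≤ x * (x + 1) := by nlinarith
  linarith

lemma pvW_true_iff (n k t r c : Int) : pvW n k t r c = true ↔
    ((0 ≤ c ∧ c ≤ r ∧ r < n) ∧
      (pvCode n r c < k ∨ (pvCode n r c = k ∧ pvSI n r c ≤ t))) := by
  unfold pvW; exact decide_eq_true_iff

lemma pvIntMod (k : Int) : PySem.Int.mod k 3 = k % 3 := by
  simp [PySem.Int.mod, Int.fmod_eq_emod]

lemma pvSetGetD {α : Type} (l : List α) (i j : Nat) (x : α) (dflt : α)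
    (hi : i < l.length) :
    (l.set i x).getD j dflt = if j = i then x else l.getD j dflt := by
  by_cases h : j = i
  · subst h
    rw [List.getD_eq_getElem?_getD, List.getElem?_set, if_pos rfl, if_pos hi, if_pos rfl]
    rfl
  · rw [if_neg h, List.getD_eq_getElem?_getD, List.getElem?_set, if_neg (fun hh => h hh.symm),
      ← List.getD_eq_getElem?_getD]

-- writing the step-t cell carries the invariant from t-1 to t
lemma pvInv_write (n k t : Int) (sq : List (List (Option Int))) (r c : Int)
    (hr0 : 0 ≤ r) (hr1 : r < n) (hc0 : 0 ≤ c) (hc1 : c < n)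
    (hW : pvW n k t r c = true)
    (hnew : ∀ r' c' : Int, 0 ≤ r' → r' < n → 0 ≤ c' → c' < n → ¬(r' = r ∧ c' = c) →
        pvW n k t r' c' = pvW n k (t - 1) r' c')
    (h : pvInv n k (t - 1) sq) :
    pvInv n k t (PySem.List.pySetD sq r
      (PySem.List.pySetD (PySem.List.pyGetD sq r []) c (some (pvValue n r c)))) := by
  obtain ⟨hlen, hrows, hcell⟩ := h
  have hrn : r.toNat < sq.length := by omega
  have hrowOld : PySem.List.pyGetD sq r [] = sq.getD r.toNat [] :=
    PySem.List.pyGetD_of_nonneg sq [] hr0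
  have hrowMem : sq.getD r.toNat [] ∈ sq := by
    rw [List.getD_eq_getElem sq [] hrn]; exact List.getElem_mem hrn
  have hrowLen : (sq.getD r.toNat []).length = n.toNat := hrows _ hrowMem
  have hcn : c.toNat < (sq.getD r.toNat []).length := by omega
  rw [hrowOld, PySem.List.pySetD_of_nonneg _ _ hc0, PySem.List.pySetD_of_nonneg _ _ hr0]
  refine ⟨by simp [List.length_set, hlen], ?_, ?_⟩
  · intro rl hrl
    rcases List.mem_or_eq_of_mem_set hrl with hmem | heq
    · exact hrows rl hmem
    · rw [heq, List.length_set]; exact hrowLen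
  · intro r' c' hr0' hr1' hc0' hc1'
    by_cases hr' : r' = r
    · subst hr'
      rw [pvSetGetD _ _ _ _ _ hrn, if_pos rfl]
      by_cases hc' : c' = c
      · subst hc'
        rw [pvSetGetD _ _ _ _ _ hcn, if_pos rfl, if_pos hW]
      · rw [pvSetGetD _ _ _ _ _ hcn, if_neg (by omega),
          hcell r' c' hr0' hr1' hc0' hc1',
          hnew r' c' hr0' hr1' hc0' hc1' (fun hh => hc' hh.2)]
    · rw [pvSetGetD _ _ _ _ _ hrn, if_neg (by omega),
        hcell r' c' hr0' hr1' hc0' hc1',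
        hnew r' c' hr0' hr1' hc0' hc1' (fun hh => hr' hh.1)]

-- one leg of A's walk, generic in the direction and the per-step cell facts
lemma pvLegGen (n k dr dc num0 r0 c0 : Int)
    (hA0 : PySem.List.pyGetD (PySem.List.pyGetD pvRulelist (PySem.Int.mod k 3) []) 0 0 = dr)
    (hA1 : PySem.List.pyGetD (PySem.List.pyGetD pvRulelist (PySem.Int.mod k 3) []) 1 0 = dc) :
    ∀ (L : Nat),
    (∀ t : Int, 1 ≤ t → t ≤ (L : Int) →
        (0 ≤ r0 + t * dr ∧ r0 + t * dr < n ∧ 0 ≤ c0 + t * dc ∧ c0 + t * dc < n) ∧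
        pvW n k t (r0 + t * dr) (c0 + t * dc) = true ∧
        (∀ r' c' : Int, 0 ≤ r' → r' < n → 0 ≤ c' → c' < n →
            ¬(r' = r0 + t * dr ∧ c' = c0 + t * dc) →
            pvW n k t r' c' = pvW n k (t - 1) r' c') ∧
        pvValue n (r0 + t * dr) (c0 + t * dc) = num0 + t - 1) →
    ∀ sq, pvInv n k 0 sq →
    ∃ sq', (PySem.List.pyRange 0 (L : Int)).foldl pvStepA (sq, num0, k, r0, c0)
            = (sq', num0 + L, k, r0 + L * dr, c0 + L * dc) ∧ pvInv n k (L : Int) sq' := by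
  have stepA_eq : ∀ sq num row col j, pvStepA (sq, num, k, row, col) j =
      (PySem.List.pySetD sq (row + dr)
        (PySem.List.pySetD (PySem.List.pyGetD sq (row + dr) []) (col + dc) (some num)),
       num + 1, k, row + dr, col + dc) := by
    intro sq num row col j
    show (let row' := row + PySem.List.pyGetD (PySem.List.pyGetD pvRulelist (PySem.Int.mod k 3) []) 0 0
          let col' := col + PySem.List.pyGetD (PySem.List.pyGetD pvRulelist (PySem.Int.mod k 3) []) 1 0
          let sq' := PySem.List.pySetD sq row' (PySem.List.pySetD (PySem.List.pyGetD sq row' []) col' (some num))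
          (sq', num + 1, k, row', col')) = _
    rw [hA0, hA1]
  intro L
  induction L with
  | zero =>
    intro _ sq hInv
    refine ⟨sq, ?_, ?_⟩
    · simp only [Nat.cast_zero, PySem.List.pyRange_one_eq_nil (le_refl (0 : Int)),
        List.foldl_nil, zero_mul, add_zero]
    · simpa only [Nat.cast_zero] using hInv
  | succ L ih =>
    intro hcell sq hInv
    have hcast : ((L + 1 : Nat) : Int) = (L : Int) + 1 := by push_cast; ring
    rw [hcast, PySem.List.pyRange_one_succ_right (by positivity), List.foldl_append]
    obtain ⟨sq', hFA, hInv'⟩ :=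
      ih (fun t ht1 ht2 => hcell t ht1 (by push_cast at ht2 ⊢; omega)) sq hInv
    rw [hFA]
    simp only [List.foldl_cons, List.foldl_nil]
    rw [stepA_eq]
    obtain ⟨⟨hb0, hb1, hb2, hb3⟩, hWt, hnew, hFt⟩ :=
      hcell ((L : Int) + 1) (by omega) (by push_cast; omega)
    have e1 : r0 + (L : Int) * dr + dr = r0 + ((L : Int) + 1) * dr := by ring
    have e2 : c0 + (L : Int) * dc + dc = c0 + ((L : Int) + 1) * dc := by ring
    rw [e1, e2]
    have hval : (some (num0 + (L : Int)) : Option Int)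
        = some (pvValue n (r0 + ((L : Int) + 1) * dr) (c0 + ((L : Int) + 1) * dc)) := by
      rw [hFt]; congr 1; ring
    rw [hval]
    rw [show num0 + (L : Int) + 1 = num0 + ((L : Int) + 1) from by ring]
    have hInv'' : pvInv n k (((L : Int) + 1) - 1) sq' := by
      rw [show ((L : Int) + 1) - 1 = (L : Int) from by ring]; exact hInv'
    exact ⟨_, rfl, pvInv_write n k ((L : Int) + 1) sq' _ _ hb0 hb1 hb2 hb3 hWt hnew hInv''⟩

-- characterisation of (depth, branch, step) from the code: each leg's cells are determined
lemma pvUniq0 (n d r c : Int) (_htri : 0 ≤ c ∧ c ≤ r ∧ r < n)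
    (hcode : pvCode n r c = 3 * d) : c = d ∧ pvSI n r c = r - 2 * d + 1 := by
  unfold pvCode pvSI at *
  unfold pvD at *
  split_ifs at * <;> omega

lemma pvUniq1 (n d r c : Int) (_htri : 0 ≤ c ∧ c ≤ r ∧ r < n)
    (hcode : pvCode n r c = 3 * d + 1) : r = n - 1 - d ∧ pvSI n r c = c - d := by
  unfold pvCode pvSI at *
  unfold pvD at *
  split_ifs at * <;> omega

lemma pvUniq2 (n d r c : Int) (_htri : 0 ≤ c ∧ c ≤ r ∧ r < n)
    (hcode : pvCode n r c = 3 * d + 2) : r - c = d ∧ pvSI n r c = n - 1 - d - r := by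
  unfold pvCode pvSI at *
  unfold pvD at *
  split_ifs at * <;> omega

-- every triangle cell's step index is within its leg, whose length is n - code
lemma pvSI_bounds (n r c : Int) (_htri : 0 ≤ c ∧ c ≤ r ∧ r < n) :
    1 ≤ pvSI n r c ∧ pvSI n r c ≤ n - pvCode n r c := by
  unfold pvCode pvSI
  unfold pvD
  split_ifs <;> omega

lemma pvCode_nonneg (n r c : Int) (_htri : 0 ≤ c ∧ c ≤ r ∧ r < n) : 0 ≤ pvCode n r c := by
  unfold pvCode pvD; split_ifs <;> omega

lemma pvCode_lt (n r c : Int) (_htri : 0 ≤ c ∧ c ≤ r ∧ r < n) : pvCode n r c < n := by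
  unfold pvCode pvD; split_ifs <;> omega

-- cell facts for the three leg shapes (k = 3d / 3d+1 / 3d+2)
lemma pvCell0 (n d t : Int) (hd : 0 ≤ d) (ht : 1 ≤ t) (htm : t ≤ n - 3 * d) :
    (0 ≤ (2 * d - 1 + t) ∧ 2 * d - 1 + t < n ∧ 0 ≤ d ∧ d < n) ∧
    pvCode n (2 * d - 1 + t) d = 3 * d ∧ pvSI n (2 * d - 1 + t) d = t ∧
    pvValue n (2 * d - 1 + t) d = (pvQ n - pvQ (n - 3 * d) + 1) + t - 1 := by
  have hD : pvD n (2 * d - 1 + t) d = d := by unfold pvD; omega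
  refine ⟨by omega, ?_, ?_, ?_⟩
  · unfold pvCode; rw [hD, if_pos rfl]
  · unfold pvSI; rw [hD, if_pos rfl]; omega
  · show (if d = min d (min ((2 * d - 1 + t) - d) (n - 1 - (2 * d - 1 + t))) then _ else _) = _
    have hm : min d (min ((2 * d - 1 + t) - d) (n - 1 - (2 * d - 1 + t))) = d := by omega
    rw [hm, if_pos rfl]
    unfold pvQ; ring

lemma pvCell1 (n d t : Int) (hd : 0 ≤ d) (ht : 1 ≤ t) (htm : t ≤ n - 3 * d - 1) :
    (0 ≤ (n - 1 - d) ∧ n - 1 - d < n ∧ 0 ≤ d + t ∧ d + t < n) ∧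
    pvCode n (n - 1 - d) (d + t) = 3 * d + 1 ∧ pvSI n (n - 1 - d) (d + t) = t ∧
    pvValue n (n - 1 - d) (d + t) = (pvQ n - pvQ (n - 3 * d) + 1 + (n - 3 * d)) + t - 1 := by
  have hD : pvD n (n - 1 - d) (d + t) = d := by unfold pvD; omega
  refine ⟨by omega, ?_, ?_, ?_⟩
  · unfold pvCode; rw [hD, if_neg (by omega), if_pos rfl]
  · unfold pvSI; rw [hD, if_neg (by omega), if_pos rfl]; omega
  · show (if d + t = min (d + t) (min ((n - 1 - d) - (d + t)) (n - 1 - (n - 1 - d))) then _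
          else if n - 1 - d = n - 1 - min (d + t) (min ((n - 1 - d) - (d + t)) (n - 1 - (n - 1 - d))) then _
          else _) = _
    have hm : min (d + t) (min ((n - 1 - d) - (d + t)) (n - 1 - (n - 1 - d))) = d := by omega
    rw [hm, if_neg (by omega), if_pos rfl]
    unfold pvQ; ring

lemma pvCell2 (n d t : Int) (hd : 0 ≤ d) (ht : 1 ≤ t) (htm : t ≤ n - 3 * d - 2) :
    (0 ≤ (n - 1 - d - t) ∧ n - 1 - d - t < n ∧ 0 ≤ n - 1 - 2 * d - t ∧ n - 1 - 2 * d - t < n) ∧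
    pvCode n (n - 1 - d - t) (n - 1 - 2 * d - t) = 3 * d + 2 ∧
    pvSI n (n - 1 - d - t) (n - 1 - 2 * d - t) = t ∧
    pvValue n (n - 1 - d - t) (n - 1 - 2 * d - t)
      = (pvQ n - pvQ (n - 3 * d) + 1 + 2 * (n - 3 * d) - 1) + t - 1 := by
  have hD : pvD n (n - 1 - d - t) (n - 1 - 2 * d - t) = d := by unfold pvD; omega
  refine ⟨by omega, ?_, ?_, ?_⟩
  · unfold pvCode; rw [hD, if_neg (by omega), if_neg (by omega)]
  · unfold pvSI; rw [hD, if_neg (by omega), if_neg (by omega)]; omega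
  · show (if n - 1 - 2 * d - t = min (n - 1 - 2 * d - t) (min ((n - 1 - d - t) - (n - 1 - 2 * d - t)) (n - 1 - (n - 1 - d - t))) then _
          else if n - 1 - d - t = n - 1 - min (n - 1 - 2 * d - t) (min ((n - 1 - d - t) - (n - 1 - 2 * d - t)) (n - 1 - (n - 1 - d - t))) then _
          else _) = _
    have hm : min (n - 1 - 2 * d - t) (min ((n - 1 - d - t) - (n - 1 - 2 * d - t)) (n - 1 - (n - 1 - d - t))) = d := by omega
    rw [hm, if_neg (by omega), if_neg (by omega)]
    unfold pvQ; ring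

-- after a complete leg the invariant restates with the next code and step 0
lemma pvInv_nextLeg (n k : Int) (sq : List (List (Option Int)))
    (h : pvInv n k (n - k) sq) : pvInv n (k + 1) 0 sq := by
  obtain ⟨h1, h2, h3⟩ := h
  refine ⟨h1, h2, ?_⟩
  intro r c hr0 hr1 hc0 hc1
  rw [h3 r c hr0 hr1 hc0 hc1]
  have hWeq : pvW n k (n - k) r c = pvW n (k + 1) 0 r c := by
    unfold pvW
    rw [decide_eq_decide]
    by_cases htri : 0 ≤ c ∧ c ≤ r ∧ r < n
    · have hsi := pvSI_bounds n r c htri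
      constructor
      · rintro ⟨_, hx | ⟨hx, _⟩⟩ <;> exact ⟨htri, Or.inl (by omega)⟩
      · rintro ⟨_, hx | ⟨hx, hy⟩⟩
        · rcases (show pvCode n r c < k ∨ pvCode n r c = k from by omega) with h | h
          · exact ⟨htri, Or.inl h⟩
          · exact ⟨htri, Or.inr ⟨h, by omega⟩⟩
        · exact (by omega : False).elim
    · constructor <;> rintro ⟨ht, _⟩ <;> exact absurd ht htri
  rw [hWeq]

-- the whole walk, leg by leg
lemma pvOuter (n : Int) (hn : 0 ≤ n) : ∀ (m k : Nat), k + m = n.toNat →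
    ∀ (sq : List (List (Option Int))) (row col : Int),
    pvInv n (k : Int) 0 sq → pvPos n k row col →
    ∃ sA : List (List (Option Int)) × Int × Int × Int × Int,
      (PySem.List.pyRange (m : Int) 0 (-1)).foldl pvLegA
        (sq, 1 + pvQ n - pvQ (m : Int), (k : Int), row, col) = sA ∧
      pvInv n ((n.toNat : Nat) : Int) 0 sA.1 := by
  intro m
  induction m with
  | zero =>
    intro k hk sq row col hInv _
    rw [show ((0 : Nat) : Int) = 0 from rfl, PySem.List.pyRange_neg_one_eq_nil (le_refl 0)]
    refine ⟨_, rfl, ?_⟩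
    have : ((n.toNat : Nat) : Int) = (k : Int) := by omega
    rw [this]; exact hInv
  | succ m ih =>
    intro k hk sq row col hInv hPos
    obtain ⟨hP0, hP1, hP2⟩ := hPos
    have hm1 : (0 : Int) < ((m + 1 : Nat) : Int) := by push_cast; omega
    rw [PySem.List.pyRange_neg_one_cons hm1]
    simp only [List.foldl_cons]
    have hsub : ((m + 1 : Nat) : Int) - 1 = ((m : Nat) : Int) := by push_cast; ring
    have hcast1 : ((k : Nat) : Int) + 1 = ((k + 1 : Nat) : Int) := by push_cast; ring
    have hML : ((m + 1 : Nat) : Int) = n - (k : Int) := by omega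
    set d : Int := ((k / 3 : Nat) : Int) with hd
    have hd0 : 0 ≤ d := by positivity
    rcases (show k % 3 = 0 ∨ k % 3 = 1 ∨ k % 3 = 2 by omega) with hk3 | hk3 | hk3
    · -- leg k = 3d: down the left edge, direction (1, 0)
      obtain ⟨hrow, hcol⟩ := hP0 hk3
      have hkd : (k : Int) = 3 * d := by
        rw [hd]; push_cast; omega
      have hmod : PySem.Int.mod (k : Int) 3 = 0 := by rw [pvIntMod]; omega
      have hA0 : PySem.List.pyGetD (PySem.List.pyGetD pvRulelist (PySem.Int.mod (k : Int) 3) []) 0 0 = 1 := by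
        rw [hmod]; decide
      have hA1 : PySem.List.pyGetD (PySem.List.pyGetD pvRulelist (PySem.Int.mod (k : Int) 3) []) 1 0 = 0 := by
        rw [hmod]; decide
      have hnum : 1 + pvQ n - pvQ ((m + 1 : Nat) : Int) = pvQ n - pvQ (n - 3 * d) + 1 := by
        rw [show ((m + 1 : Nat) : Int) = n - 3 * d from by omega]; ring
      have hcellH : ∀ t : Int, 1 ≤ t → t ≤ ((m + 1 : Nat) : Int) →
          (0 ≤ row + t * 1 ∧ row + t * 1 < n ∧ 0 ≤ col + t * 0 ∧ col + t * 0 < n) ∧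
          pvW n (k : Int) t (row + t * 1) (col + t * 0) = true ∧
          (∀ r' c' : Int, 0 ≤ r' → r' < n → 0 ≤ c' → c' < n →
              ¬(r' = row + t * 1 ∧ c' = col + t * 0) →
              pvW n (k : Int) t r' c' = pvW n (k : Int) (t - 1) r' c') ∧
          pvValue n (row + t * 1) (col + t * 0) = (1 + pvQ n - pvQ ((m + 1 : Nat) : Int)) + t - 1 := by
        intro t ht1 ht2
        have htm : t ≤ n - 3 * d := by omega
        have her : row + t * 1 = 2 * d - 1 + t := by omega
        have hec : col + t * 0 = d := by omega
        obtain ⟨hb, hc, hs, hf⟩ := pvCell0 n d t hd0 ht1 htm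
        rw [her, hec]
        refine ⟨hb, ?_, ?_, by rw [hf, hnum]⟩
        · rw [pvW_true_iff]
          exact ⟨⟨by omega, by omega, by omega⟩, Or.inr ⟨by omega, by omega⟩⟩
        · intro r' c' hr0' hr1' hc0' hc1' hne
          simp only [pvW, decide_eq_decide]
          constructor
          · rintro ⟨htri, hx | ⟨hx, hy⟩⟩
            · exact ⟨htri, Or.inl hx⟩
            · rcases (show pvSI n r' c' ≤ t - 1 ∨ pvSI n r' c' = t from by omega) with hz | hz
              · exact ⟨htri, Or.inr ⟨hx, hz⟩⟩
              · exfalso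
                obtain ⟨he1, he2⟩ := pvUniq0 n d r' c' htri (by omega)
                exact hne ⟨by omega, by omega⟩
          · rintro ⟨htri, hx | ⟨hx, hy⟩⟩
            · exact ⟨htri, Or.inl hx⟩
            · exact ⟨htri, Or.inr ⟨hx, by omega⟩⟩
      obtain ⟨sq', hFA, hInv'⟩ := pvLegGen n (k : Int) 1 0
        (1 + pvQ n - pvQ ((m + 1 : Nat) : Int)) row col hA0 hA1 (m + 1) hcellH sq hInv
      have hLeg : pvLegA (sq, 1 + pvQ n - pvQ ((m + 1 : Nat) : Int), (k : Int), row, col) ((m + 1 : Nat) : Int)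
          = (sq', 1 + pvQ n - pvQ ((m + 1 : Nat) : Int) + ((m + 1 : Nat) : Int), ((k + 1 : Nat) : Int),
             row + ((m + 1 : Nat) : Int) * 1, col + ((m + 1 : Nat) : Int) * 0) := by
        unfold pvLegA; rw [hFA]; dsimp only; rw [hcast1]
      rw [hLeg, hsub]
      have hnum' : 1 + pvQ n - pvQ ((m + 1 : Nat) : Int) + ((m + 1 : Nat) : Int)
          = 1 + pvQ n - pvQ ((m : Nat) : Int) := by
        have := pvQ_succ ((m + 1 : Nat) : Int)
        have he : ((m + 1 : Nat) : Int) - 1 = ((m : Nat) : Int) := by push_cast; ring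
        rw [he] at this
        linarith
      rw [hnum']
      have hInvNext : pvInv n ((k + 1 : Nat) : Int) 0 sq' := by
        rw [← hcast1]
        apply pvInv_nextLeg
        rw [show n - (k : Int) = ((m + 1 : Nat) : Int) from by omega]
        exact hInv'
      have hPos' : pvPos n (k + 1) (row + ((m + 1 : Nat) : Int) * 1) (col + ((m + 1 : Nat) : Int) * 0) := by
        refine ⟨fun h => by omega, fun h => ?_, fun h => by omega⟩
        constructor
        · have : ((k + 1) / 3 : Nat) = k / 3 := by omega
          rw [this]; omega
        · have : ((k + 1) / 3 : Nat) = k / 3 := by omega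
          rw [this]; omega
      exact ih (k + 1) (by omega) sq' _ _ hInvNext hPos'
    · -- leg k = 3d+1: right along the bottom, direction (0, 1)
      obtain ⟨hrow, hcol⟩ := hP1 hk3
      have hkd : (k : Int) = 3 * d + 1 := by
        rw [hd]; push_cast; omega
      have hmod : PySem.Int.mod (k : Int) 3 = 1 := by rw [pvIntMod]; omega
      have hA0 : PySem.List.pyGetD (PySem.List.pyGetD pvRulelist (PySem.Int.mod (k : Int) 3) []) 0 0 = 0 := by
        rw [hmod]; decide
      have hA1 : PySem.List.pyGetD (PySem.List.pyGetD pvRulelist (PySem.Int.mod (k : Int) 3) []) 1 0 = 1 := by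
        rw [hmod]; decide
      have hnum : 1 + pvQ n - pvQ ((m + 1 : Nat) : Int) = pvQ n - pvQ (n - 3 * d) + 1 + (n - 3 * d) := by
        have := pvQ_succ (n - 3 * d)
        rw [show ((m + 1 : Nat) : Int) = n - 3 * d - 1 from by omega]
        linarith
      have hcellH : ∀ t : Int, 1 ≤ t → t ≤ ((m + 1 : Nat) : Int) →
          (0 ≤ row + t * 0 ∧ row + t * 0 < n ∧ 0 ≤ col + t * 1 ∧ col + t * 1 < n) ∧
          pvW n (k : Int) t (row + t * 0) (col + t * 1) = true ∧
          (∀ r' c' : Int, 0 ≤ r' → r' < n → 0 ≤ c' → c' < n →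
              ¬(r' = row + t * 0 ∧ c' = col + t * 1) →
              pvW n (k : Int) t r' c' = pvW n (k : Int) (t - 1) r' c') ∧
          pvValue n (row + t * 0) (col + t * 1) = (1 + pvQ n - pvQ ((m + 1 : Nat) : Int)) + t - 1 := by
        intro t ht1 ht2
        have htm : t ≤ n - 3 * d - 1 := by omega
        have her : row + t * 0 = n - 1 - d := by omega
        have hec : col + t * 1 = d + t := by omega
        obtain ⟨hb, hc, hs, hf⟩ := pvCell1 n d t hd0 ht1 htm
        rw [her, hec]
        refine ⟨hb, ?_, ?_, by rw [hf, hnum]⟩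
        · rw [pvW_true_iff]
          exact ⟨⟨by omega, by omega, by omega⟩, Or.inr ⟨by omega, by omega⟩⟩
        · intro r' c' hr0' hr1' hc0' hc1' hne
          simp only [pvW, decide_eq_decide]
          constructor
          · rintro ⟨htri, hx | ⟨hx, hy⟩⟩
            · exact ⟨htri, Or.inl hx⟩
            · rcases (show pvSI n r' c' ≤ t - 1 ∨ pvSI n r' c' = t from by omega) with hz | hz
              · exact ⟨htri, Or.inr ⟨hx, hz⟩⟩
              · exfalso
                obtain ⟨he1, he2⟩ := pvUniq1 n d r' c' htri (by omega)
                exact hne ⟨by omega, by omega⟩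
          · rintro ⟨htri, hx | ⟨hx, hy⟩⟩
            · exact ⟨htri, Or.inl hx⟩
            · exact ⟨htri, Or.inr ⟨hx, by omega⟩⟩
      obtain ⟨sq', hFA, hInv'⟩ := pvLegGen n (k : Int) 0 1
        (1 + pvQ n - pvQ ((m + 1 : Nat) : Int)) row col hA0 hA1 (m + 1) hcellH sq hInv
      have hLeg : pvLegA (sq, 1 + pvQ n - pvQ ((m + 1 : Nat) : Int), (k : Int), row, col) ((m + 1 : Nat) : Int)
          = (sq', 1 + pvQ n - pvQ ((m + 1 : Nat) : Int) + ((m + 1 : Nat) : Int), ((k + 1 : Nat) : Int),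
             row + ((m + 1 : Nat) : Int) * 0, col + ((m + 1 : Nat) : Int) * 1) := by
        unfold pvLegA; rw [hFA]; dsimp only; rw [hcast1]
      rw [hLeg, hsub]
      have hnum' : 1 + pvQ n - pvQ ((m + 1 : Nat) : Int) + ((m + 1 : Nat) : Int)
          = 1 + pvQ n - pvQ ((m : Nat) : Int) := by
        have := pvQ_succ ((m + 1 : Nat) : Int)
        have he : ((m + 1 : Nat) : Int) - 1 = ((m : Nat) : Int) := by push_cast; ring
        rw [he] at this
        linarith
      rw [hnum']
      have hInvNext : pvInv n ((k + 1 : Nat) : Int) 0 sq' := by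
        rw [← hcast1]
        apply pvInv_nextLeg
        rw [show n - (k : Int) = ((m + 1 : Nat) : Int) from by omega]
        exact hInv'
      have hPos' : pvPos n (k + 1) (row + ((m + 1 : Nat) : Int) * 0) (col + ((m + 1 : Nat) : Int) * 1) := by
        refine ⟨fun h => by omega, fun h => by omega, fun h => ?_⟩
        have : ((k + 1) / 3 : Nat) = k / 3 := by omega
        rw [this]
        constructor <;> omega
      exact ih (k + 1) (by omega) sq' _ _ hInvNext hPos'
    · -- leg k = 3d+2: up the hypotenuse, direction (-1, -1)
      obtain ⟨hrow, hcol⟩ := hP2 hk3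
      have hkd : (k : Int) = 3 * d + 2 := by
        rw [hd]; push_cast; omega
      have hmod : PySem.Int.mod (k : Int) 3 = 2 := by rw [pvIntMod]; omega
      have hA0 : PySem.List.pyGetD (PySem.List.pyGetD pvRulelist (PySem.Int.mod (k : Int) 3) []) 0 0 = -1 := by
        rw [hmod]; decide
      have hA1 : PySem.List.pyGetD (PySem.List.pyGetD pvRulelist (PySem.Int.mod (k : Int) 3) []) 1 0 = -1 := by
        rw [hmod]; decide
      have hnum : 1 + pvQ n - pvQ ((m + 1 : Nat) : Int)
          = pvQ n - pvQ (n - 3 * d) + 1 + 2 * (n - 3 * d) - 1 := by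
        have h1 := pvQ_succ (n - 3 * d)
        have h2 := pvQ_succ (n - 3 * d - 1)
        rw [show ((m + 1 : Nat) : Int) = n - 3 * d - 2 from by omega]
        have he : n - 3 * d - 1 - 1 = n - 3 * d - 2 := by ring
        rw [he] at h2
        linarith
      have hcellH : ∀ t : Int, 1 ≤ t → t ≤ ((m + 1 : Nat) : Int) →
          (0 ≤ row + t * (-1) ∧ row + t * (-1) < n ∧ 0 ≤ col + t * (-1) ∧ col + t * (-1) < n) ∧
          pvW n (k : Int) t (row + t * (-1)) (col + t * (-1)) = true ∧
          (∀ r' c' : Int, 0 ≤ r' → r' < n → 0 ≤ c' → c' < n →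
              ¬(r' = row + t * (-1) ∧ c' = col + t * (-1)) →
              pvW n (k : Int) t r' c' = pvW n (k : Int) (t - 1) r' c') ∧
          pvValue n (row + t * (-1)) (col + t * (-1)) = (1 + pvQ n - pvQ ((m + 1 : Nat) : Int)) + t - 1 := by
        intro t ht1 ht2
        have htm : t ≤ n - 3 * d - 2 := by omega
        have her : row + t * (-1) = n - 1 - d - t := by omega
        have hec : col + t * (-1) = n - 1 - 2 * d - t := by omega
        obtain ⟨hb, hc, hs, hf⟩ := pvCell2 n d t hd0 ht1 htm
        rw [her, hec]
        refine ⟨hb, ?_, ?_, by rw [hf, hnum]⟩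
        · rw [pvW_true_iff]
          exact ⟨⟨by omega, by omega, by omega⟩, Or.inr ⟨by omega, by omega⟩⟩
        · intro r' c' hr0' hr1' hc0' hc1' hne
          simp only [pvW, decide_eq_decide]
          constructor
          · rintro ⟨htri, hx | ⟨hx, hy⟩⟩
            · exact ⟨htri, Or.inl hx⟩
            · rcases (show pvSI n r' c' ≤ t - 1 ∨ pvSI n r' c' = t from by omega) with hz | hz
              · exact ⟨htri, Or.inr ⟨hx, hz⟩⟩
              · exfalso
                obtain ⟨he1, he2⟩ := pvUniq2 n d r' c' htri (by omega)
                exact hne ⟨by omega, by omega⟩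
          · rintro ⟨htri, hx | ⟨hx, hy⟩⟩
            · exact ⟨htri, Or.inl hx⟩
            · exact ⟨htri, Or.inr ⟨hx, by omega⟩⟩
      obtain ⟨sq', hFA, hInv'⟩ := pvLegGen n (k : Int) (-1) (-1)
        (1 + pvQ n - pvQ ((m + 1 : Nat) : Int)) row col hA0 hA1 (m + 1) hcellH sq hInv
      have hLeg : pvLegA (sq, 1 + pvQ n - pvQ ((m + 1 : Nat) : Int), (k : Int), row, col) ((m + 1 : Nat) : Int)
          = (sq', 1 + pvQ n - pvQ ((m + 1 : Nat) : Int) + ((m + 1 : Nat) : Int), ((k + 1 : Nat) : Int),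
             row + ((m + 1 : Nat) : Int) * (-1), col + ((m + 1 : Nat) : Int) * (-1)) := by
        unfold pvLegA; rw [hFA]; dsimp only; rw [hcast1]
      rw [hLeg, hsub]
      have hnum' : 1 + pvQ n - pvQ ((m + 1 : Nat) : Int) + ((m + 1 : Nat) : Int)
          = 1 + pvQ n - pvQ ((m : Nat) : Int) := by
        have := pvQ_succ ((m + 1 : Nat) : Int)
        have he : ((m + 1 : Nat) : Int) - 1 = ((m : Nat) : Int) := by push_cast; ring
        rw [he] at this
        linarith
      rw [hnum']
      have hInvNext : pvInv n ((k + 1 : Nat) : Int) 0 sq' := by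
        rw [← hcast1]
        apply pvInv_nextLeg
        rw [show n - (k : Int) = ((m + 1 : Nat) : Int) from by omega]
        exact hInv'
      have hPos' : pvPos n (k + 1) (row + ((m + 1 : Nat) : Int) * (-1)) (col + ((m + 1 : Nat) : Int) * (-1)) := by
        refine ⟨fun h => ?_, fun h => by omega, fun h => by omega⟩
        have : ((k + 1) / 3 : Nat) = k / 3 + 1 := by omega
        rw [this]
        constructor <;> push_cast <;> omega
      exact ih (k + 1) (by omega) sq' _ _ hInvNext hPos'

-- the initial square of empty cells satisfies the invariant before the first leg
lemma pvInvInit (n : Int) (hn : 0 ≤ n) :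
    pvInv n 0 0 ((PySem.List.pyRange 0 n).map
      (fun _ => (PySem.List.pyRange 0 n).map (fun _ => (none : Option Int)))) := by
  have hlenR : (PySem.List.pyRange 0 n).length = n.toNat := by
    rw [PySem.List.length_pyRange_one]; omega
  refine ⟨by simp [hlenR], ?_, ?_⟩
  · intro rl hrl
    obtain ⟨x, hx, hxe⟩ := List.mem_map.mp hrl
    rw [← hxe, List.length_map, hlenR]
  · intro r c hr0 hr1 hc0 hc1
    have hr : r.toNat < (PySem.List.pyRange 0 n).length := by omega
    have hc : c.toNat < (PySem.List.pyRange 0 n).length := by omega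
    have hcell : ((((PySem.List.pyRange 0 n).map
        (fun _ => (PySem.List.pyRange 0 n).map (fun _ => (none : Option Int)))).getD r.toNat []).getD
          c.toNat none) = none := by
      simp only [List.getD_eq_getElem?_getD, List.getElem?_map]
      rw [List.getElem?_eq_getElem hr]
      simp only [Option.map_some, Option.getD_some, List.getElem?_map]
      rw [List.getElem?_eq_getElem hc]
      rfl
    rw [hcell]
    have hW : pvW n 0 0 r c = false := by
      rw [Bool.eq_false_iff, Ne, pvW_true_iff]
      rintro ⟨htri, hx | ⟨hx, hy⟩⟩
      · exact absurd hx (by have := pvCode_nonneg n r c htri; omega)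
      · have := pvSI_bounds n r c htri; omega
    rw [hW]
    rfl

-- every triangle cell's value is positive (truthy in A's scan)
lemma pvValue_pos (n r c : Int) (htri : 0 ≤ c ∧ c ≤ r ∧ r < n) : 1 ≤ pvValue n r c := by
  unfold pvValue
  dsimp only
  have hD0 : 0 ≤ min c (min (r - c) (n - 1 - r)) := by omega
  have hDm : 3 * min c (min (r - c) (n - 1 - r)) ≤ n - 1 := by omega
  have hq := pvQ_mono n (n - 3 * min c (min (r - c) (n - 1 - r))) (by omega) (by omega)
  unfold pvQ at hq
  split_ifs <;> omega

-- append-by-cons loop shapes used by A's readout port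
lemma pvFoldCons {α β : Type} (l : List α) (p : α → Prop) [DecidablePred p] (f : α → β) :
    ∀ acc : List β, l.foldl (fun ans x => if p x then f x :: ans else ans) acc
      = ((l.filter (fun x => decide (p x))).map f).reverse ++ acc := by
  induction l with
  | nil => intro acc; simp
  | cons x xs ih =>
    intro acc
    by_cases hx : p x <;>
      simp [hx, ih]

lemma pvFoldRevFlat {α β : Type} (l : List α) (g : α → List β) :
    ∀ acc : List β, l.foldl (fun a x => (g x).reverse ++ a) acc = (l.flatMap g).reverse ++ acc := by
  induction l with
  | nil => intro acc; simp
  | cons x xs ih =>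
    intro acc
    simp [ih, List.reverse_append]

-- readout: A's double scan of the final grid equals B's row-major comprehension
lemma pvReadout (n : Int) (hn : 0 ≤ n) (sq : List (List (Option Int)))
    (h : pvInv n ((n.toNat : Nat) : Int) 0 sq) :
    ((PySem.List.pyRange 0 (sq.length : Int)).foldl
      (fun answer i =>
        (PySem.List.pyRange 0 (sq.length : Int)).foldl
          (fun answer j =>
            if (PySem.List.pyGetD (PySem.List.pyGetD sq i []) j none).getD 0 ≠ 0 then
              (PySem.List.pyGetD (PySem.List.pyGetD sq i []) j none).getD 0 :: answer
            else answer)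
          answer)
      []).reverse
    = (PySem.List.pyRange 0 n).flatMap
        (fun r => (PySem.List.pyRange 0 (r + 1)).map (fun c => pvValue n r c)) := by
  obtain ⟨hlen, hrows, hcell⟩ := h
  have hlenI : (sq.length : Int) = n := by omega
  rw [hlenI]
  -- the final grid holds exactly the triangle cells, valued by pvValue
  have hfin : ∀ i ∈ PySem.List.pyRange 0 n, ∀ j ∈ PySem.List.pyRange 0 n,
      PySem.List.pyGetD (PySem.List.pyGetD sq i []) j none
        = if 0 ≤ j ∧ j ≤ i ∧ i < n then some (pvValue n i j) else none := by
    intro i hi j hj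
    rw [PySem.List.mem_pyRange_one] at hi hj
    rw [PySem.List.pyGetD_of_nonneg sq [] hi.1, PySem.List.pyGetD_of_nonneg _ none hj.1]
    rw [hcell i j hi.1 hi.2 hj.1 hj.2]
    by_cases htri : 0 ≤ j ∧ j ≤ i ∧ i < n
    · rw [if_pos htri]
      have hW : pvW n ((n.toNat : Nat) : Int) 0 i j = true := by
        rw [pvW_true_iff]
        refine ⟨htri, Or.inl ?_⟩
        have := pvCode_lt n i j htri; omega
      rw [hW]; rfl
    · rw [if_neg htri]
      have hW : pvW n ((n.toNat : Nat) : Int) 0 i j = false := by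
        rw [Bool.eq_false_iff, Ne, pvW_true_iff]
        rintro ⟨ht, _⟩; exact htri ht
      rw [hW]; rfl
  -- the inner loop over row i conses exactly columns 0..i, reading pvValue there
  have hinner : ∀ (acc : List Int), ∀ i ∈ PySem.List.pyRange 0 n,
      (PySem.List.pyRange 0 n).foldl
        (fun answer j =>
          if (PySem.List.pyGetD (PySem.List.pyGetD sq i []) j none).getD 0 ≠ 0 then
            (PySem.List.pyGetD (PySem.List.pyGetD sq i []) j none).getD 0 :: answer
          else answer)
        acc
      = ((PySem.List.pyRange 0 (i + 1)).map (fun c => pvValue n i c)).reverse ++ acc := by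
    intro acc i hi
    have hi' := PySem.List.mem_pyRange_one.mp hi
    rw [PySem.List.foldl_congr_mem _ _
      (fun answer j =>
        if ((if 0 ≤ j ∧ j ≤ i ∧ i < n then some (pvValue n i j) else none) : Option Int).getD 0 ≠ 0 then
          ((if 0 ≤ j ∧ j ≤ i ∧ i < n then some (pvValue n i j) else none) : Option Int).getD 0 :: answer
        else answer)
      acc (fun a j hj => by rw [hfin i hi j hj])]
    rw [pvFoldCons (PySem.List.pyRange 0 n)
      (fun j => ((if 0 ≤ j ∧ j ≤ i ∧ i < n then some (pvValue n i j) else none) : Option Int).getD 0 ≠ 0)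
      (fun j => ((if 0 ≤ j ∧ j ≤ i ∧ i < n then some (pvValue n i j) else none) : Option Int).getD 0)]
    congr 2
    · have hsplit : PySem.List.pyRange 0 n
          = PySem.List.pyRange 0 (i + 1) ++ PySem.List.pyRange (i + 1) n := by
        rw [PySem.List.pyRange_one_append 0 (i + 1) n (by omega) (by omega)]
      rw [hsplit, List.filter_append]
      have h1 : (PySem.List.pyRange 0 (i + 1)).filter
          (fun j => decide (((if 0 ≤ j ∧ j ≤ i ∧ i < n then some (pvValue n i j) else none) : Option Int).getD 0 ≠ 0))
          = PySem.List.pyRange 0 (i + 1) := by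
        apply List.filter_eq_self.mpr
        intro j hj
        have hj' := PySem.List.mem_pyRange_one.mp hj
        have htri : 0 ≤ j ∧ j ≤ i ∧ i < n := ⟨hj'.1, by omega, hi'.2⟩
        rw [if_pos htri]
        have := pvValue_pos n i j htri
        simp only [Option.getD_some]
        simpa using (by omega : pvValue n i j ≠ 0)
      have h2 : (PySem.List.pyRange (i + 1) n).filter
          (fun j => decide (((if 0 ≤ j ∧ j ≤ i ∧ i < n then some (pvValue n i j) else none) : Option Int).getD 0 ≠ 0))
          = [] := by
        apply List.filter_eq_nil_iff.mpr
        intro j hj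
        have hj' := PySem.List.mem_pyRange_one.mp hj
        rw [if_neg (by omega)]
        simp
      rw [h1, h2, List.append_nil]
      apply List.map_congr_left
      intro j hj
      have hj' := PySem.List.mem_pyRange_one.mp hj
      rw [if_pos ⟨hj'.1, by omega, hi'.2⟩]
      rfl
  rw [PySem.List.foldl_congr_mem _ _
    (fun answer i => ((PySem.List.pyRange 0 (i + 1)).map (fun c => pvValue n i c)).reverse ++ answer)
    [] (fun acc i hi => hinner acc i hi)]
  rw [pvFoldRevFlat]
  simp

-- ===== VERDICT (by name: the statement is the Claim_ definition above) =====
theorem solution_spec : Claim_equal_solution := by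
  unfold Claim_equal_solution Spec_solution
  intro n _
  show solution n = solution_alt n
  unfold solution_alt
  by_cases hn : n ≤ 0
  · have h1 : PySem.List.pyRange 0 n = [] := PySem.List.pyRange_one_eq_nil hn
    have h2 : PySem.List.pyRange n 0 (-1) = [] := PySem.List.pyRange_neg_one_eq_nil hn
    simp [solution, h1, h2, PySem.List.pyRange_one_eq_nil (le_refl (0 : Int))]
  · rw [not_le] at hn
    have hn0 : 0 ≤ n := le_of_lt hn
    have hnn : ((n.toNat : Nat) : Int) = n := by omega
    have hPos0 : pvPos n 0 (-1) 0 :=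
      ⟨fun _ => ⟨by norm_num, by norm_num⟩, fun h => absurd h (by decide),
       fun h => absurd h (by decide)⟩
    obtain ⟨sA, hFA, hInv⟩ :=
      pvOuter n hn0 n.toNat 0 (by omega)
        ((PySem.List.pyRange 0 n).map
          (fun _ => (PySem.List.pyRange 0 n).map (fun _ => (none : Option Int))))
        (-1) 0 (pvInvInit n hn0) hPos0
    rw [hnn] at hFA
    rw [show ((0 : Nat) : Int) = 0 from rfl,
      show 1 + pvQ n - pvQ n = (1 : Int) from by ring] at hFA
    unfold solution
    dsimp only
    rw [hFA]
    exact pvReadout n hn0 sA.1 hInv
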